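-- pv_equiv track=rewrite | github.com/RIscRIpt/mul_finder | __main__.py | factorize_into_digits
-- ===== SOURCE A (Python) =====
-- def factorize_into_digits(n):
--     primes = [2, 3, 5, 7]
--     factors = []
--     for prime in primes:
--         while n % prime == 0:
--             n //= prime
--             factors.append(prime)
--         if n == 0:
--             raise ValueError("n == 0")
--         elif n == 1:
--             break
--     return factors
-- ===== SOURCE B (Python) =====
-- def factorize_into_digits(n):
--     factors = []
--     while True:
--         for p in (2, 3, 5, 7):
--             if n % p == 0:
--                 n //= p
--                 factors.append(p)
--                 break
--         else:
--             return factors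
-- ===== Notes on version B (the rewrite author's own statement) =====
-- stated objective: alternative
-- what changed: A runs a fixed for-loop over [2,3,5,7] with an inner while stripping all powers of each prime (plus n==0/n==1 checks); B is a single while-True loop that each round rescans [2,3,5,7] for the smallest dividing prime, divides once, and returns when none divides.
import Mathlib
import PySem

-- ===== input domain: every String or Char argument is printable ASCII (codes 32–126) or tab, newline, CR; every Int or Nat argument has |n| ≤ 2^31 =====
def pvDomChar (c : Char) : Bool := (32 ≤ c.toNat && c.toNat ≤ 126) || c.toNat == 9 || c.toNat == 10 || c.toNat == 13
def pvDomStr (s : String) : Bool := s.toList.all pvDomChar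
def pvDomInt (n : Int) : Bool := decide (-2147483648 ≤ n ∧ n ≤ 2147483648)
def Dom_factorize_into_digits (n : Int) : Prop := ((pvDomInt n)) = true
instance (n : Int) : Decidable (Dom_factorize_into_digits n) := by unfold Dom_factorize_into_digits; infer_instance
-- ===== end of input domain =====

-- B replaces A's per-prime inner while-loops by a single loop that rescans [2,3,5,7]
-- for the smallest divisor each round (objective: alternative decomposition, same cost).

-- ===== PORT A =====
-- inner `while n % prime == 0` of A; fuel |n|+1 bounds the iterations for every n ≠ 0
-- (n = 0 makes Python's while loop run forever; Pre_ excludes it)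
def pvStripA (p : Int) : Nat → Int → List Int → Int × List Int
  | 0, n, fs => (n, fs)
  | fuel + 1, n, fs =>
    if PySem.Int.mod n p = 0 then
      pvStripA p fuel (PySem.Int.floordiv n p) (fs ++ [p])
    else (n, fs)

-- the `for prime in primes` loop of A
def pvLoopA : List Int → Int → List Int → List Int
  | [], _, fs => fs
  | p :: ps, n, fs =>
    let r := pvStripA p (n.natAbs + 1) n fs
    if r.1 = 0 then r.2       -- Python: raise ValueError("n == 0") — unreachable for n ≠ 0
    else if r.1 = 1 then r.2  -- break
    else pvLoopA ps r.1 r.2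

def factorize_into_digits (n : Int) : List Int := pvLoopA [2, 3, 5, 7] n []

-- ===== PORT B =====
-- the `for p in (2,3,5,7): … break / else: return` scan of B
def pvScanB : List Int → Int → Option Int
  | [], _ => none
  | p :: ps, n => if PySem.Int.mod n p = 0 then some p else pvScanB ps n

-- the `while True` loop of B; fuel |n|+1 bounds the iterations for every n ≠ 0
def pvLoopB : Nat → Int → List Int → Int → List Int
  | 0, _, fs, _ => fs
  | fuel + 1, n, fs, _ =>
    match pvScanB [2, 3, 5, 7] n with
    | none => fs
    | some p => pvLoopB fuel (PySem.Int.floordiv n p) (fs ++ [p]) 0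

def factorize_into_digits_alt (n : Int) : List Int := pvLoopB (n.natAbs + 1) n [] 0

-- ===== PRECONDITION & SPEC =====
-- Pre_ excludes only n = 0, on which Python A never returns (its first while loop runs forever).
def Pre_factorize_into_digits (n : Int) : Prop := n ≠ 0
instance (n : Int) : Decidable (Pre_factorize_into_digits n) := by unfold Pre_factorize_into_digits; infer_instance
def pvWitness_factorize_into_digits : Int := 84

def Spec_factorize_into_digits (n : Int) (out : List Int) : Prop := out = factorize_into_digits_alt n
instance (n : Int) (out : List Int) : Decidable (Spec_factorize_into_digits n out) := by unfold Spec_factorize_into_digits; infer_instance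

-- ===== CLAIM (what is proved, stated in full; the proofs are below) =====
def Claim_equal_factorize_into_digits : Prop := ∀ (n : Int), Dom_factorize_into_digits n → Pre_factorize_into_digits n → Spec_factorize_into_digits n (factorize_into_digits n)

-- ===== LEMMAS AND PROOFS =====
theorem pv_natAbs_div_lt {p n : Int} (hp : 2 ≤ p) (hn : n ≠ 0) (hd : p ∣ n) :
    (n / p).natAbs < n.natAbs := by
  obtain ⟨m, rfl⟩ := hd
  rw [Int.mul_ediv_cancel_left _ (by omega)]
  have hm : m ≠ 0 := by rintro rfl; simp at hn
  have := Int.natAbs_mul p m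
  have h1 : 1 ≤ m.natAbs := by omega
  have h2 : 2 ≤ p.natAbs := by omega
  nlinarith [this]

theorem pv_div_ne_zero {p n : Int} (hp : 2 ≤ p) (hn : n ≠ 0) (hd : p ∣ n) :
    n / p ≠ 0 := by
  obtain ⟨m, rfl⟩ := hd
  rw [Int.mul_ediv_cancel_left _ (by omega)]
  rintro rfl; simp at hn

theorem pv_not_dvd_div {p q n : Int} (hd : p ∣ n) (h : ¬ q ∣ n) :
    ¬ q ∣ (n / p) := by
  intro hq
  exact h (hq.trans (Int.ediv_dvd_of_dvd hd))

theorem pv_mod_ne {n q : Int} (h : ¬ q ∣ n) : PySem.Int.mod n q ≠ 0 := by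
  intro hm; rw [PySem.Int.mod_eq_zero_iff_dvd] at hm; exact h hm

-- fuel irrelevance for A's inner while (any fuel ≥ |n| gives the same result)
theorem pvStripA_fuel (p : Int) (hp : 2 ≤ p) :
    ∀ (k : Nat) (n : Int) (f1 f2 : Nat) (fs : List Int),
      n.natAbs ≤ k → n ≠ 0 → n.natAbs ≤ f1 → n.natAbs ≤ f2 →
      pvStripA p f1 n fs = pvStripA p f2 n fs := by
  intro k
  induction k with
  | zero => intro n _ _ _ hk hn _ _; exfalso; omega
  | succ k ih =>
    intro n f1 f2 fs hk hn h1 h2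
    have hpos : 1 ≤ n.natAbs := by omega
    obtain ⟨a, rfl⟩ : ∃ a, f1 = a + 1 := ⟨f1 - 1, by omega⟩
    obtain ⟨b, rfl⟩ : ∃ b, f2 = b + 1 := ⟨f2 - 1, by omega⟩
    by_cases hd : p ∣ n
    · have hm : PySem.Int.mod n p = 0 := by rw [PySem.Int.mod_eq_zero_iff_dvd]; exact hd
      have hfd : PySem.Int.floordiv n p = n / p :=
        PySem.Int.floordiv_eq_ediv_of_pos (by omega)
      have hlt := pv_natAbs_div_lt hp hn hd
      simp [pvStripA, hm, hfd]
      exact ih (n / p) a b (fs ++ [p]) (by omega) (pv_div_ne_zero hp hn hd) (by omega) (by omega)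
    · have hne := pv_mod_ne hd
      simp only [pvStripA, if_neg hne]

-- fuel irrelevance for B's outer loop
theorem pvScanB_some {L : List Int} {n p : Int} (h : pvScanB L n = some p) :
    p ∈ L ∧ p ∣ n := by
  induction L with
  | nil => simp [pvScanB] at h
  | cons q qs ih =>
    simp only [pvScanB] at h
    by_cases hm : PySem.Int.mod n q = 0
    · rw [if_pos hm] at h
      obtain rfl : q = p := by injection h
      exact ⟨List.mem_cons_self, by rw [← PySem.Int.mod_eq_zero_iff_dvd]; exact hm⟩
    · rw [if_neg hm] at h
      obtain ⟨ha, hb⟩ := ih h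
      exact ⟨List.mem_cons_of_mem _ ha, hb⟩

theorem pvLoopB_fuel :
    ∀ (k : Nat) (n : Int) (f1 f2 : Nat) (fs : List Int),
      n.natAbs ≤ k → n ≠ 0 → n.natAbs ≤ f1 → n.natAbs ≤ f2 →
      pvLoopB f1 n fs 0 = pvLoopB f2 n fs 0 := by
  intro k
  induction k with
  | zero => intro n _ _ _ hk hn _ _; exfalso; omega
  | succ k ih =>
    intro n f1 f2 fs hk hn h1 h2
    have hpos : 1 ≤ n.natAbs := by omega
    obtain ⟨a, rfl⟩ : ∃ a, f1 = a + 1 := ⟨f1 - 1, by omega⟩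
    obtain ⟨b, rfl⟩ : ∃ b, f2 = b + 1 := ⟨f2 - 1, by omega⟩
    cases hs : pvScanB [2, 3, 5, 7] n with
    | none => simp only [pvLoopB, hs]
    | some p =>
      obtain ⟨hmem, hd⟩ := pvScanB_some hs
      have hp : 2 ≤ p := by fin_cases hmem <;> norm_num
      have hfd : PySem.Int.floordiv n p = n / p :=
        PySem.Int.floordiv_eq_ediv_of_pos (by omega)
      have hlt := pv_natAbs_div_lt hp hn hd
      simp only [pvLoopB, hs, hfd]
      exact ih (n / p) a b (fs ++ [p]) (by omega) (pv_div_ne_zero hp hn hd) (by omega) (by omega)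

-- one divisible step of A's for-loop body keeps the same prime list
theorem pvLoopA_cons_dvd {p n : Int} (ps : List Int) (fs : List Int)
    (hp : 2 ≤ p) (hn : n ≠ 0) (hd : p ∣ n) :
    pvLoopA (p :: ps) n fs = pvLoopA (p :: ps) (n / p) (fs ++ [p]) := by
  have hm : PySem.Int.mod n p = 0 := by rw [PySem.Int.mod_eq_zero_iff_dvd]; exact hd
  have hfd : PySem.Int.floordiv n p = n / p :=
    PySem.Int.floordiv_eq_ediv_of_pos (by omega)
  have hlt := pv_natAbs_div_lt hp hn hd
  have hstep : pvStripA p (n.natAbs + 1) n fs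
      = pvStripA p ((n / p).natAbs + 1) (n / p) (fs ++ [p]) := by
    have : pvStripA p (n.natAbs + 1) n fs = pvStripA p n.natAbs (n / p) (fs ++ [p]) := by
      simp [pvStripA, hm, hfd]
    rw [this]
    exact pvStripA_fuel p hp (n / p).natAbs (n / p) n.natAbs ((n / p).natAbs + 1)
      (fs ++ [p]) (le_refl _) (pv_div_ne_zero hp hn hd) (by omega) (by omega)
  simp only [pvLoopA, hstep]

theorem pvLoopA_cons_nodvd {p n : Int} (ps : List Int) (fs : List Int)
    (hn : n ≠ 0) (hd : ¬ p ∣ n) :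
    pvLoopA (p :: ps) n fs = if n = 1 then fs else pvLoopA ps n fs := by
  have hstrip : pvStripA p (n.natAbs + 1) n fs = (n, fs) := by
    simp only [pvStripA, if_neg (pv_mod_ne hd)]
  simp only [pvLoopA, hstrip, if_neg hn]

theorem pvLoopB_none {n : Int} (fs : List Int)
    (h2 : ¬ (2:Int) ∣ n) (h3 : ¬ (3:Int) ∣ n) (h5 : ¬ (5:Int) ∣ n) (h7 : ¬ (7:Int) ∣ n) :
    pvLoopB (n.natAbs + 1) n fs 0 = fs := by
  have hs : pvScanB [2, 3, 5, 7] n = none := by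
    simp [pvScanB, h2, h3, h5, h7]
  simp only [pvLoopB, hs]

theorem pvLoopB_step {n p : Int} (fs : List Int) (hp : 2 ≤ p) (hn : n ≠ 0)
    (hs : pvScanB [2, 3, 5, 7] n = some p) (hd : p ∣ n) :
    pvLoopB (n.natAbs + 1) n fs 0 = pvLoopB ((n / p).natAbs + 1) (n / p) (fs ++ [p]) 0 := by
  have hfd : PySem.Int.floordiv n p = n / p :=
    PySem.Int.floordiv_eq_ediv_of_pos (by omega)
  have hlt := pv_natAbs_div_lt hp hn hd
  have : pvLoopB (n.natAbs + 1) n fs 0 = pvLoopB n.natAbs (n / p) (fs ++ [p]) 0 := by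
    simp only [pvLoopB, hs, hfd]
  rw [this]
  exact pvLoopB_fuel (n / p).natAbs (n / p) n.natAbs ((n / p).natAbs + 1) (fs ++ [p])
    (le_refl _) (pv_div_ne_zero hp hn hd) (by omega) (by omega)

-- main correspondence: for each suffix of [2,3,5,7], A's remaining for-loop agrees with
-- B's restart-scan loop, given that the already-processed primes no longer divide n
theorem pv_main : ∀ (k : Nat) (n : Int), n.natAbs ≤ k → n ≠ 0 →
    ((∀ fs, pvLoopA [2, 3, 5, 7] n fs = pvLoopB (n.natAbs + 1) n fs 0)
   ∧ (¬ (2:Int) ∣ n → ∀ fs, pvLoopA [3, 5, 7] n fs = pvLoopB (n.natAbs + 1) n fs 0)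
   ∧ (¬ (2:Int) ∣ n → ¬ (3:Int) ∣ n → ∀ fs, pvLoopA [5, 7] n fs = pvLoopB (n.natAbs + 1) n fs 0)
   ∧ (¬ (2:Int) ∣ n → ¬ (3:Int) ∣ n → ¬ (5:Int) ∣ n → ∀ fs, pvLoopA [7] n fs = pvLoopB (n.natAbs + 1) n fs 0)) := by
  intro k
  induction k with
  | zero => intro n hk hn; exfalso; omega
  | succ k ih =>
    intro n hk hn
    have hone : ∀ fs : List Int, pvLoopB ((1:Int).natAbs + 1) 1 fs 0 = fs := by
      intro fs; rfl
    have S3 : ¬ (2:Int) ∣ n → ¬ (3:Int) ∣ n → ¬ (5:Int) ∣ n →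
        ∀ fs, pvLoopA [7] n fs = pvLoopB (n.natAbs + 1) n fs 0 := by
      intro h2 h3 h5 fs
      by_cases h7 : (7:Int) ∣ n
      · have hn' := pv_div_ne_zero (by norm_num) hn h7
        have hlt := pv_natAbs_div_lt (p := 7) (by norm_num) hn h7
        have hs : pvScanB [2, 3, 5, 7] n = some 7 := by
          have hm : PySem.Int.mod n 7 = 0 := by rw [PySem.Int.mod_eq_zero_iff_dvd]; exact h7
          simp [pvScanB, h2, h3, h5, h7]
        rw [pvLoopA_cons_dvd [] fs (by norm_num) hn h7,
            pvLoopB_step fs (by norm_num) hn hs h7]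
        exact (ih (n / 7) (by omega) hn').2.2.2
          (pv_not_dvd_div h7 h2) (pv_not_dvd_div h7 h3)
          (pv_not_dvd_div h7 h5) (fs ++ [7])
      · rw [pvLoopA_cons_nodvd [] fs hn h7]
        rw [pvLoopB_none fs h2 h3 h5 h7]
        split_ifs <;> simp [pvLoopA]
    have S2 : ¬ (2:Int) ∣ n → ¬ (3:Int) ∣ n →
        ∀ fs, pvLoopA [5, 7] n fs = pvLoopB (n.natAbs + 1) n fs 0 := by
      intro h2 h3 fs
      by_cases h5 : (5:Int) ∣ n
      · have hn' := pv_div_ne_zero (by norm_num) hn h5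
        have hs : pvScanB [2, 3, 5, 7] n = some 5 := by
          have hm : PySem.Int.mod n 5 = 0 := by rw [PySem.Int.mod_eq_zero_iff_dvd]; exact h5
          simp [pvScanB, h2, h3, h5]
        rw [pvLoopA_cons_dvd [7] fs (by norm_num) hn h5,
            pvLoopB_step fs (by norm_num) hn hs h5]
        exact (ih (n / 5) (by have := pv_natAbs_div_lt (p := 5) (by norm_num) hn h5; omega) hn').2.2.1
          (pv_not_dvd_div h5 h2) (pv_not_dvd_div h5 h3) (fs ++ [5])
      · rw [pvLoopA_cons_nodvd [7] fs hn h5]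
        split_ifs with h1
        · subst h1
          rw [hone fs]
        · exact S3 h2 h3 h5 fs
    have S1 : ¬ (2:Int) ∣ n →
        ∀ fs, pvLoopA [3, 5, 7] n fs = pvLoopB (n.natAbs + 1) n fs 0 := by
      intro h2 fs
      by_cases h3 : (3:Int) ∣ n
      · have hn' := pv_div_ne_zero (by norm_num) hn h3
        have hs : pvScanB [2, 3, 5, 7] n = some 3 := by
          have hm : PySem.Int.mod n 3 = 0 := by rw [PySem.Int.mod_eq_zero_iff_dvd]; exact h3
          simp [pvScanB, h2, h3]
        rw [pvLoopA_cons_dvd [5, 7] fs (by norm_num) hn h3,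
            pvLoopB_step fs (by norm_num) hn hs h3]
        exact (ih (n / 3) (by have := pv_natAbs_div_lt (p := 3) (by norm_num) hn h3; omega) hn').2.1
          (pv_not_dvd_div h3 h2) (fs ++ [3])
      · rw [pvLoopA_cons_nodvd [5, 7] fs hn h3]
        split_ifs with h1
        · subst h1
          rw [hone fs]
        · exact S2 h2 h3 fs
    have S0 : ∀ fs, pvLoopA [2, 3, 5, 7] n fs = pvLoopB (n.natAbs + 1) n fs 0 := by
      intro fs
      by_cases h2 : (2:Int) ∣ n
      · have hn' := pv_div_ne_zero (by norm_num) hn h2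
        have hs : pvScanB [2, 3, 5, 7] n = some 2 := by
          have hm : PySem.Int.mod n 2 = 0 := by rw [PySem.Int.mod_eq_zero_iff_dvd]; exact h2
          simp [pvScanB, h2]
        rw [pvLoopA_cons_dvd [3, 5, 7] fs (by norm_num) hn h2,
            pvLoopB_step fs (by norm_num) hn hs h2]
        exact (ih (n / 2) (by have := pv_natAbs_div_lt (p := 2) (by norm_num) hn h2; omega) hn').1 (fs ++ [2])
      · rw [pvLoopA_cons_nodvd [3, 5, 7] fs hn h2]
        split_ifs with h1
        · subst h1
          rw [hone fs]
        · exact S1 h2 fs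
    exact ⟨S0, fun h2 => S1 h2, fun h2 h3 => S2 h2 h3, fun h2 h3 h5 => S3 h2 h3 h5⟩

-- ===== VERDICT (by name: the statement is the Claim_ definition above) =====
theorem factorize_into_digits_spec : Claim_equal_factorize_into_digits := by
  intro n _ hn
  unfold Spec_factorize_into_digits factorize_into_digits factorize_into_digits_alt
  exact (pv_main n.natAbs n (le_refl _) hn).1 []
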